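-- pv_equiv track=rewrite | github.com/SanderRonde/bachelor-thesis | scripts/main.py | filter_deviations
-- ===== SOURCE A (Python) =====
-- def filter_deviations(deviations):
--     by_user = dict()
--     for i in range(len(deviations)):
--         data = deviations[i]
--         user = data["key"]
--         val = data["val"]
--         if user in by_user:
--             by_user[user].append(val)
--         else:
--             by_user[user] = [val]
--
--     filtered_deviations = list()
--     for user, datapoints in by_user.items():
--         last_five = datapoints[-5:]
--         for i in range(len(last_five)):
--             filtered_deviations.append({
--                 "key": user,
--                 "val": last_five[i]
--             })
--     return filtered_deviations
-- ===== SOURCE B (Python) =====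
-- def filter_deviations(deviations):
--     last5 = {}
--     for data in deviations:
--         vals = last5.setdefault(data["key"], [])
--         vals.append(data["val"])
--         if len(vals) > 5:
--             vals.pop(0)
--     return [{"key": u, "val": v} for u, vals in last5.items() for v in vals]
-- ===== Notes on version B (the rewrite author's own statement) =====
-- stated objective: simpler
-- what changed: B maintains a bounded last-five window per user during a single pass (evicting the oldest value as it goes) and emits the result with one flat comprehension, instead of A's accumulate-everything dict followed by a second loop that slices [-5:] and appends element by element.
import Mathlib
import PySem

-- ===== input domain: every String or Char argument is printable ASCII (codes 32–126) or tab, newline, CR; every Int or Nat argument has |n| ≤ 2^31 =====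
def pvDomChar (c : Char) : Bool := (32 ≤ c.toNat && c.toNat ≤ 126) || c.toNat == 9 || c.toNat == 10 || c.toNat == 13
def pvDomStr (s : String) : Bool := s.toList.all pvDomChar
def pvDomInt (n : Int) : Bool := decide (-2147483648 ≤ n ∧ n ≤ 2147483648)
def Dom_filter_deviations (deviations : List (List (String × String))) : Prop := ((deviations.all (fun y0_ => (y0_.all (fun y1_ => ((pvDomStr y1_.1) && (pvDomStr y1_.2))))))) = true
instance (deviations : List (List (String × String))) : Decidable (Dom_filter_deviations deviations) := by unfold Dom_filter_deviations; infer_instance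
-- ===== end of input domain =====

-- ===== PORT A =====
-- shared input-reading helper: data["key"] on an input dict (assoc list, first match);
-- Pre_ guarantees the key is present, so the "" default never fires (KeyError is excluded by Pre_)
def pvLookup (data : List (String × String)) (k : String) : String :=
  ((PySem.Dict.mk data).get? k).getD ""

def filter_deviations (deviations : List (List (String × String))) : List (List (String × String)) :=
  let by_user : PySem.Dict String (List String) :=
    (PySem.List.pyRange 0 (PySem.List.len deviations)).foldl (fun d i =>
      let data := PySem.List.pyGetD deviations i []
      let user := pvLookup data "key"
      let val := pvLookup data "val"
      if d.contains user then d.modify user [] (fun l => l ++ [val])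
      else d.insert user [val]) (PySem.Dict.mk [])
  by_user.items.foldl (fun acc p =>
    let last_five := PySem.List.slice p.2 (some (-5)) none
    (PySem.List.pyRange 0 (PySem.List.len last_five)).foldl (fun acc i =>
      acc ++ [[("key", p.1), ("val", PySem.List.pyGetD last_five i "")]]) acc) []

-- ===== PORT B =====
def filter_deviations_alt (deviations : List (List (String × String))) : List (List (String × String)) :=
  let last5 : PySem.Dict String (List String) :=
    deviations.foldl (fun d data =>
      let vals := d.getD (pvLookup data "key") [] ++ [pvLookup data "val"]
      d.insert (pvLookup data "key") (if 5 < vals.length then vals.drop 1 else vals))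
      (PySem.Dict.mk [])
  last5.items.flatMap (fun p => p.2.map (fun v => [("key", p.1), ("val", v)]))

-- ===== PRECONDITION & SPEC =====
-- Pre_ excludes exactly the inputs where the Python raises KeyError: a dict missing "key" or "val".
def Pre_filter_deviations (deviations : List (List (String × String))) : Prop :=
  ∀ data ∈ deviations,
    (PySem.Dict.mk data).contains "key" = true ∧ (PySem.Dict.mk data).contains "val" = true
instance (deviations : List (List (String × String))) : Decidable (Pre_filter_deviations deviations) := by
  unfold Pre_filter_deviations; infer_instance

def pvWitness_filter_deviations : (List (List (String × String))) :=
  [[("key", "alice"), ("val", "3")], [("key", "bob"), ("val", "7")], [("key", "alice"), ("val", "4")]]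

def Spec_filter_deviations (deviations : List (List (String × String))) (out : List (List (String × String))) : Prop := out = filter_deviations_alt deviations
instance (deviations : List (List (String × String))) (out : List (List (String × String))) : Decidable (Spec_filter_deviations deviations out) := by unfold Spec_filter_deviations; infer_instance

-- ===== CLAIM (what is proved, stated in full; the proofs are below) =====
def Claim_equal_filter_deviations : Prop := ∀ (deviations : List (List (String × String))), Dom_filter_deviations deviations → Pre_filter_deviations deviations → Spec_filter_deviations deviations (filter_deviations deviations)

-- ===== LEMMAS AND PROOFS =====

-- proof-only helpers (the ports above do not use them)
def pvLast5 (l : List String) : List String := l.drop (l.length - 5)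

def pvF : String × List String → String × List String := fun p => (p.1, pvLast5 p.2)

def pvMk (u v : String) : List (String × String) := [("key", u), ("val", v)]

-- the two per-element fold steps, as named functions (definitionally the ports' lambdas)
def pvStepA (d : PySem.Dict String (List String)) (data : List (String × String)) :
    PySem.Dict String (List String) :=
  if d.contains (pvLookup data "key") then
    d.modify (pvLookup data "key") [] (fun l => l ++ [pvLookup data "val"])
  else d.insert (pvLookup data "key") [pvLookup data "val"]

def pvStepB (d : PySem.Dict String (List String)) (data : List (String × String)) :
    PySem.Dict String (List String) :=
  let vals := d.getD (pvLookup data "key") [] ++ [pvLookup data "val"]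
  d.insert (pvLookup data "key") (if 5 < vals.length then vals.drop 1 else vals)

lemma pv_contains_of_rel (dA dB : PySem.Dict String (List String))
    (h : dB.items = dA.items.map pvF) (u : String) : dB.contains u = dA.contains u := by
  simp [PySem.Dict.contains, h, List.any_map, Function.comp_def, pvF]

lemma pv_get?_of_rel (dA dB : PySem.Dict String (List String))
    (h : dB.items = dA.items.map pvF) (u : String) :
    dB.get? u = (dA.get? u).map pvLast5 := by
  simp [PySem.Dict.get?, h, List.find?_map]
  rfl

lemma pv_insert_of_rel (dA dB : PySem.Dict String (List String))
    (h : dB.items = dA.items.map pvF) (u : String) (w : List String) :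
    (dB.insert u (pvLast5 w)).items = (dA.insert u w).items.map pvF := by
  simp only [PySem.Dict.insert, pv_contains_of_rel dA dB h u]
  split
  · simp only [h, List.map_map]
    apply List.map_congr_left
    intro p _
    by_cases hp : p.1 = u <;> simp [pvF, hp]
  · simp [h, pvF]

lemma pv_last5_snoc (a : List String) (v : String) :
    (if 5 < (pvLast5 a ++ [v]).length then (pvLast5 a ++ [v]).drop 1 else pvLast5 a ++ [v])
      = pvLast5 (a ++ [v]) := by
  simp only [pvLast5, List.length_append, List.length_drop, List.length_cons, List.length_nil]
  by_cases h5 : a.length < 5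
  · have h1 : a.length - 5 = 0 := by omega
    have h2 : a.length + 1 - 5 = 0 := by omega
    rw [h1, h2, if_neg (by omega)]
    simp
  · have h1 : a.length - (a.length - 5) + 1 = 6 := by omega
    rw [h1, if_pos (by omega : 5 < 6)]
    rw [List.drop_append_of_le_length (by simp; omega), List.drop_drop,
        List.drop_append_of_le_length (by omega)]
    congr 2
    omega

lemma pv_stepA_insert (d : PySem.Dict String (List String)) (data : List (String × String)) :
    pvStepA d data
      = d.insert (pvLookup data "key") (d.getD (pvLookup data "key") [] ++ [pvLookup data "val"]) := by
  unfold pvStepA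
  split
  · rfl
  · rename_i hc
    simp only [PySem.Dict.contains, Bool.not_eq_true, List.any_eq_false] at hc
    have hn : d.items.find? (fun p => p.1 == pvLookup data "key") = none :=
      List.find?_eq_none.mpr (by intro p hp; simp [hc p hp])
    simp [PySem.Dict.getD, PySem.Dict.get?, hn]

lemma pv_step_rel (dA dB : PySem.Dict String (List String))
    (h : dB.items = dA.items.map pvF) (data : List (String × String)) :
    (pvStepB dB data).items = (pvStepA dA data).items.map pvF := by
  rw [pv_stepA_insert]
  have hg : dB.getD (pvLookup data "key") [] = pvLast5 (dA.getD (pvLookup data "key") []) := by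
    simp only [PySem.Dict.getD, pv_get?_of_rel dA dB h]
    cases dA.get? (pvLookup data "key") <;> simp [pvLast5]
  unfold pvStepB
  simp only [hg, pv_last5_snoc]
  exact pv_insert_of_rel dA dB h _ _

lemma pv_fold_rel (l : List (List (String × String))) (dA dB : PySem.Dict String (List String))
    (h : dB.items = dA.items.map pvF) :
    (l.foldl pvStepB dB).items = (l.foldl pvStepA dA).items.map pvF := by
  induction l generalizing dA dB with
  | nil => simpa using h
  | cons x xs ih => exact ih _ _ (pv_step_rel dA dB h x)

lemma pv_slice_neg5 (l : List String) : PySem.List.slice l (some (-5)) none = pvLast5 l := by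
  have hc : PySem.List.clampIdx l.length (-5) = l.length - 5 := by
    simp only [PySem.List.clampIdx]
    split_ifs <;> omega

  show List.take (l.length - PySem.List.clampIdx l.length (-5))
        (List.drop (PySem.List.clampIdx l.length (-5)) l) = List.drop (l.length - 5) l
  rw [hc]
  exact List.take_of_length_le (by simp)

-- A's output loop over by_user.items, rewritten to a flatMap over last-five windows
lemma pv_out_loop (items : List (String × List String)) (acc : List (List (String × String))) :
    items.foldl (fun acc p =>
      let last_five := PySem.List.slice p.2 (some (-5)) none
      (PySem.List.pyRange 0 (PySem.List.len last_five)).foldl (fun acc i =>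
        acc ++ [[("key", p.1), ("val", PySem.List.pyGetD last_five i "")]]) acc) acc
    = acc ++ items.flatMap (fun p => (pvLast5 p.2).map (pvMk p.1)) := by
  have hbody : (fun (acc : List (List (String × String))) (p : String × List String) =>
      let last_five := PySem.List.slice p.2 (some (-5)) none
      (PySem.List.pyRange 0 (PySem.List.len last_five)).foldl (fun acc i =>
        acc ++ [[("key", p.1), ("val", PySem.List.pyGetD last_five i "")]]) acc)
      = fun acc p => acc ++ (pvLast5 p.2).map (pvMk p.1) := by
    funext acc p
    exact (PySem.List.foldl_pyRange_pyGetD (PySem.List.slice p.2 (some (-5)) none) ""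
            (fun acc v => acc ++ [pvMk p.1 v]) acc (le_refl 0)).trans
          (by rw [PySem.List.foldl_append_singleton_eq_map]; simp [pv_slice_neg5])
  rw [hbody, PySem.List.foldl_append_eq_flatMap]

lemma pv_AB_eq (deviations : List (List (String × String))) :
    filter_deviations deviations = filter_deviations_alt deviations := by
  have hA : filter_deviations deviations
      = (deviations.foldl pvStepA (PySem.Dict.mk [])).items.flatMap
          (fun p => (pvLast5 p.2).map (pvMk p.1)) := by
    show ((PySem.List.pyRange 0 (PySem.List.len deviations)).foldl
        (fun d i => pvStepA d (PySem.List.pyGetD deviations i [])) (PySem.Dict.mk [])).items.foldl _ [] = _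
    rw [PySem.List.foldl_pyRange_pyGetD deviations [] pvStepA (PySem.Dict.mk []) (le_refl 0)]
    exact pv_out_loop _ []
  have hB : filter_deviations_alt deviations
      = (deviations.foldl pvStepB (PySem.Dict.mk [])).items.flatMap
          (fun p => p.2.map (pvMk p.1)) := rfl
  rw [hA, hB, pv_fold_rel deviations (PySem.Dict.mk []) (PySem.Dict.mk []) rfl, List.flatMap_map]
  rfl

-- ===== VERDICT (by name: the statement is the Claim_ definition above) =====
theorem filter_deviations_spec : Claim_equal_filter_deviations := by
  intro deviations _ _
  exact pv_AB_eq deviations
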